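-- pv_equiv track=rewrite | github.com/Sa3doun13/PADL-2022 | JSS/dispatching_rules/FIFO.py | job_time_length
-- ===== SOURCE A (Python) =====
-- def job_time_length(features, jobs, operations):
--     i = 0
--     job_index = 0
--     # calculate the length of each job and store the values in the feature matrix
--     while(job_index < jobs * operations):
--         count = 0
--         while(count < operations):
--             features[job_index][8] = features[i][5] + features[i][4]
--             count += 1
--             job_index += 1
--         i += operations
--     return features
-- ===== SOURCE B (Python) =====
-- def job_time_length(features, jobs, operations):
--     if jobs <= 0 or operations <= 0:
--         return features
--     n = jobs * operations
--     rebuilt = []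
--     for k in range(0, n, operations):
--         chunk = features[k:k + operations]
--         s = chunk[0][4] + chunk[0][5]
--         rebuilt += [row[:8] + [s] + row[9:] for row in chunk]
--     features[:n] = rebuilt
--     return features
-- ===== Notes on version B (the rewrite author's own statement) =====
-- stated objective: alternative
-- what changed: Instead of A's twin-counter nested while loops writing cell [8] in place row by row, B slices the matrix into per-job chunks, rebuilds each affected row functionally as row[:8] + [sum] + row[9:], and splices the rebuilt prefix back with one slice assignment.
import Mathlib
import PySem

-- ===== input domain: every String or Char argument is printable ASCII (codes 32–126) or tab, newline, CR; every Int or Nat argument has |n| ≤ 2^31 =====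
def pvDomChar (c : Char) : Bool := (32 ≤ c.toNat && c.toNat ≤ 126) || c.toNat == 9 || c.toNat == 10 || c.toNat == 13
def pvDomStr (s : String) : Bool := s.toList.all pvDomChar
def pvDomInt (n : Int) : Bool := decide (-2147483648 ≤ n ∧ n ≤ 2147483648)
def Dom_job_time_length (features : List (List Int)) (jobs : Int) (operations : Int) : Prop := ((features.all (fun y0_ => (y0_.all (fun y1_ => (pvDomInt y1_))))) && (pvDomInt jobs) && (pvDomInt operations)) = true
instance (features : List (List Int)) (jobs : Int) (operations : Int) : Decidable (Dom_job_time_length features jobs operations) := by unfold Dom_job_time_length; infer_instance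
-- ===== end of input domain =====

-- B replaces A's twin-counter in-place nested while loops by slicing the matrix into per-job chunks and rebuilding
-- each affected row functionally (row[:8] + [sum] + row[9:]); same return value. Side effects differ: A mutates the
-- row lists in place while B splices freshly built rows into `features` — the claim is about the return value.

-- ===== PORT A =====
-- features[i][5] + features[i][4]
def jtlVal (fs : List (List Int)) (i : Int) : Int :=
  PySem.List.pyGetD (PySem.List.pyGetD fs i []) 5 0 + PySem.List.pyGetD (PySem.List.pyGetD fs i []) 4 0

-- features[j][8] = v
def jtlWrite (fs : List (List Int)) (j : Int) (v : Int) : List (List Int) :=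
  PySem.List.pySetD fs j (PySem.List.pySetD (PySem.List.pyGetD fs j []) 8 v)

-- inner 'while (count < operations)'; fuel = operations.toNat, exactly the iterations Python makes; returns (features, job_index)
def jtlInner : Nat → List (List Int) → Int → Int → Int → Int → List (List Int) × Int
  | 0, fs, _, j, _, _ => (fs, j)
  | fuel+1, fs, i, j, count, ops =>
    if count < ops then jtlInner fuel (jtlWrite fs j (jtlVal fs i)) i (j+1) (count+1) ops
    else (fs, j)

-- outer 'while (job_index < jobs*operations)'; fuel = jobs.toNat + 1 covers every terminating run
def jtlOuter : Nat → List (List Int) → Int → Int → Int → Int → List (List Int)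
  | 0, fs, _, _, _, _ => fs
  | fuel+1, fs, i, j, jobs, ops =>
    if j < jobs * ops then
      let p := jtlInner ops.toNat fs i j 0 ops
      jtlOuter fuel p.1 (i + ops) p.2 jobs ops
    else fs

def job_time_length (features : List (List Int)) (jobs : Int) (operations : Int) : List (List Int) :=
  jtlOuter (jobs.toNat + 1) features 0 0 jobs operations

-- ===== PORT B =====
def job_time_length_alt (features : List (List Int)) (jobs : Int) (operations : Int) : List (List Int) :=
  if jobs ≤ 0 ∨ operations ≤ 0 then features
  else
    let n := jobs * operations
    -- for k in range(0, n, operations): chunk = features[k:k+operations]; s = chunk[0][4]+chunk[0][5];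
    --   rebuilt += [row[:8] + [s] + row[9:] for row in chunk]
    let rebuilt := (PySem.List.pyRange 0 n operations).foldl (fun acc k =>
      let chunk := PySem.List.slice features (some k) (some (k + operations))
      let s := PySem.List.pyGetD (PySem.List.pyGetD chunk 0 []) 4 0 +
               PySem.List.pyGetD (PySem.List.pyGetD chunk 0 []) 5 0
      acc ++ chunk.map (fun row =>
        PySem.List.slice row none (some 8) ++ [s] ++ PySem.List.slice row (some 9) none)) []
    -- features[:n] = rebuilt; return features
    rebuilt ++ PySem.List.slice features (some n) none

-- ===== PRECONDITION & SPEC =====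
-- Pre_ excludes exactly the inputs on which the Python A does not return: when jobs*operations > 0 it needs
-- 0 < jobs and 0 < operations (otherwise the inner loop never advances job_index and A loops forever),
-- at least jobs*operations rows, and length ≥ 9 for each of the first jobs*operations rows (else IndexError).
def Pre_job_time_length (features : List (List Int)) (jobs : Int) (operations : Int) : Prop :=
  jobs * operations ≤ 0 ∨
  (0 < jobs ∧ 0 < operations ∧ jobs * operations ≤ (features.length : Int) ∧
    ∀ row ∈ features.take (jobs * operations).toNat, 9 ≤ row.length)

instance (features : List (List Int)) (jobs : Int) (operations : Int) : Decidable (Pre_job_time_length features jobs operations) := by unfold Pre_job_time_length; infer_instance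

def pvWitness_job_time_length : List (List Int) × Int × Int :=
  ([[0, 0, 0, 0, 3, 4, 0, 0, 0], [0, 0, 0, 0, 1, 2, 0, 0, 0]], 2, 1)

def Spec_job_time_length (features : List (List Int)) (jobs : Int) (operations : Int) (out : List (List Int)) : Prop := out = job_time_length_alt features jobs operations
instance (features : List (List Int)) (jobs : Int) (operations : Int) (out : List (List Int)) : Decidable (Spec_job_time_length features jobs operations out) := by unfold Spec_job_time_length; infer_instance

-- ===== CLAIM (what is proved, stated in full; the proofs are below) =====
def Claim_equal_job_time_length : Prop := ∀ (features : List (List Int)) (jobs : Int) (operations : Int), Dom_job_time_length features jobs operations → Pre_job_time_length features jobs operations → Spec_job_time_length features jobs operations (job_time_length features jobs operations)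

-- ===== LEMMAS AND PROOFS =====

-- Nat-level picture of A's loops: read cell, write column 8, the per-row value.
def cellN (fs : List (List Int)) (n c : Nat) : Int := (fs.getD n []).getD c 0

def writeN (fs : List (List Int)) (n : Nat) (v : Int) : List (List Int) :=
  fs.set n ((fs.getD n []).set 8 v)

def valN (fs : List (List Int)) (opn r : Nat) : Int :=
  cellN fs (r / opn * opn) 4 + cellN fs (r / opn * opn) 5

lemma jtlVal_cast (fs : List (List Int)) (n : Nat) :
    jtlVal fs (n : Int) = cellN fs n 5 + cellN fs n 4 := by
  simp [jtlVal, cellN, PySem.List.pyGetD_ofNat']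

lemma jtlWrite_cast (fs : List (List Int)) (n : Nat) (v : Int) :
    jtlWrite fs (n : Int) v = writeN fs n v := by
  simp [jtlWrite, writeN, PySem.List.pySetD_of_nonneg, PySem.List.pyGetD_natCast]

-- writing column 8 never changes any cell in another column
lemma cellN_writeN (fs : List (List Int)) (m : Nat) (v : Int) (n c : Nat) (hc : c ≠ 8) :
    cellN (writeN fs m v) n c = cellN fs n c := by
  unfold cellN writeN
  rcases Nat.lt_or_ge m fs.length with hm | hm
  · by_cases hnm : n = m
    · subst hnm
      simp [List.getD, List.getElem?_set_self hm, List.getElem?_set_ne (by omega : 8 ≠ c)]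
    · simp [List.getD, List.getElem?_set_ne (fun h => hnm h.symm)]
  · simp [List.set_eq_of_length_le hm]

lemma cellN_foldl_writeN (rs : List Nat) (g : Nat → Nat) (h : Nat → Int)
    (fs : List (List Int)) (n c : Nat) (hc : c ≠ 8) :
    cellN (rs.foldl (fun f t => writeN f (g t) (h t)) fs) n c = cellN fs n c := by
  induction rs generalizing fs with
  | nil => rfl
  | cons r rs ih => simp only [List.foldl_cons]; rw [ih, cellN_writeN _ _ _ _ _ hc]

-- the inner loop writes rows jn, jn+1, …, jn+k-1, all with the value read at row i when the block starts
lemma inner_eq (k : Nat) : ∀ (fs : List (List Int)) (inat jn : Nat) (count ops : Int),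
    (ops - count).toNat = k →
    jtlInner k fs (inat : Int) (jn : Int) count ops =
      ((List.range k).foldl (fun f t => writeN f (jn + t) (cellN fs inat 5 + cellN fs inat 4)) fs,
        ((jn + k : Nat) : Int)) := by
  induction k with
  | zero => intro fs inat jn count ops hk; simp [jtlInner]
  | succ k ih =>
    intro fs inat jn count ops hk
    have hlt : count < ops := by omega
    rw [jtlInner, if_pos hlt]
    have h1 : ((jn : Int) + 1) = ((jn + 1 : Nat) : Int) := by push_cast; ring
    rw [jtlVal_cast, jtlWrite_cast, h1, ih _ inat (jn + 1) (count + 1) ops (by omega)]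
    rw [Prod.mk.injEq]
    refine ⟨?_, by congr 1; omega⟩
    rw [cellN_writeN _ _ _ _ _ (by omega), cellN_writeN _ _ _ _ _ (by omega)]
    rw [List.range_succ_eq_map, List.foldl_cons, List.foldl_map]
    congr 1
    funext f t; congr 1; omega

-- the outer loop, entered at block b with m blocks to go, performs the flat fill of rows b*opn … (b+m)*opn - 1
lemma outer_eq (m : Nat) : ∀ (fuel : Nat) (fs : List (List Int)) (b : Nat) (jobs ops : Int),
    0 < ops → jobs.toNat = b + m → m ≤ fuel →
    jtlOuter fuel fs ((b * ops.toNat : Nat) : Int) ((b * ops.toNat : Nat) : Int) jobs ops =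
      (List.range (m * ops.toNat)).foldl
        (fun f t => writeN f (b * ops.toNat + t) (valN fs ops.toNat (b * ops.toNat + t))) fs := by
  induction m with
  | zero =>
    intro fuel fs b jobs ops ho hjb _
    have hops : ops = (ops.toNat : Int) := by omega
    have hguard : ¬ ((b * ops.toNat : Nat) : Int) < jobs * ops := by
      have h1 : jobs ≤ (b : Int) := by omega
      have h2 : jobs * ops ≤ (b : Int) * ops := mul_le_mul_of_nonneg_right h1 ho.le
      push_cast
      rw [← hops]
      exact not_lt.mpr h2
    cases fuel with
    | zero => simp [jtlOuter]
    | succ f => rw [jtlOuter, if_neg hguard]; simp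
  | succ m ih =>
    intro fuel fs b jobs ops ho hjb hfuel
    have hopn : 0 < ops.toNat := by omega
    have hops : ops = (ops.toNat : Int) := by omega
    cases fuel with
    | zero => omega
    | succ f =>
      have hguard : ((b * ops.toNat : Nat) : Int) < jobs * ops := by
        have hg : (b * ops.toNat : Nat) < ((b + m + 1) * ops.toNat : Nat) :=
          (Nat.mul_lt_mul_right hopn).mpr (by omega)
        have hjobs : jobs = ((b + m + 1 : Nat) : Int) := by omega
        rw [hjobs, hops]
        exact_mod_cast hg
      rw [jtlOuter, if_pos hguard]
      simp only
      rw [inner_eq ops.toNat fs (b * ops.toNat) (b * ops.toNat) 0 ops (by omega)]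
      simp only
      have harg1 : ((b * ops.toNat : Nat) : Int) + ops = (((b+1) * ops.toNat : Nat) : Int) := by
        push_cast; rw [← hops]; ring
      have harg2 : ((b * ops.toNat + ops.toNat : Nat) : Int) = (((b+1) * ops.toNat : Nat) : Int) := by
        congr 1; ring
      rw [harg1, harg2, ih f _ (b+1) jobs ops ho (by omega) (by omega)]
      set V := cellN fs (b * ops.toNat) 5 + cellN fs (b * ops.toNat) 4 with hV
      set fsB := (List.range ops.toNat).foldl
        (fun f t => writeN f (b * ops.toNat + t) V) fs with hfsB
      have hval : ∀ r, valN fsB ops.toNat r = valN fs ops.toNat r := by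
        intro r
        simp only [valN, hfsB]
        rw [cellN_foldl_writeN _ _ _ _ _ _ (by omega), cellN_foldl_writeN _ _ _ _ _ _ (by omega)]
      have hsplit : (m+1) * ops.toNat = ops.toNat + m * ops.toNat := by ring
      rw [hsplit, List.range_add, List.foldl_append, List.foldl_map]
      have hpref : (List.range ops.toNat).foldl
          (fun f t => writeN f (b * ops.toNat + t) (valN fs ops.toNat (b * ops.toNat + t))) fs = fsB := by
        apply PySem.List.foldl_congr_mem
        intro acc t ht
        have ht' : t < ops.toNat := List.mem_range.mp ht
        have hdiv : (b * ops.toNat + t) / ops.toNat = b := by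
          rw [Nat.mul_comm b ops.toNat, Nat.mul_add_div hopn, Nat.div_eq_of_lt ht', Nat.add_zero]
        simp only [valN, hdiv, hV]
        ring_nf
      rw [hpref]
      congr 1
      funext f' t
      have hidx : b * ops.toNat + (ops.toNat + t) = (b+1) * ops.toNat + t := by ring
      rw [hidx, hval]

-- A as a flat fill of the first m rows
def fillA (fs : List (List Int)) (opn m : Nat) : List (List Int) :=
  (List.range m).foldl (fun f t => writeN f t (valN fs opn t)) fs

lemma fillA_succ (fs : List (List Int)) (opn m : Nat) :
    fillA fs opn (m + 1) = writeN (fillA fs opn m) m (valN fs opn m) := by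
  rw [fillA, List.range_succ, List.foldl_append, List.foldl_cons, List.foldl_nil, fillA]

lemma length_writeN (fs : List (List Int)) (n : Nat) (v : Int) :
    (writeN fs n v).length = fs.length := by simp [writeN]

lemma length_fillA (fs : List (List Int)) (opn m : Nat) :
    (fillA fs opn m).length = fs.length := by
  induction m with
  | zero => rfl
  | succ m ih => rw [fillA_succ, length_writeN, ih]

lemma getElem?_fillA (fs : List (List Int)) (opn m : Nat) (hm : m ≤ fs.length) (r : Nat) :
    (fillA fs opn m)[r]? =
      if r < m then some ((fs.getD r []).set 8 (valN fs opn r)) else fs[r]? := by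
  induction m with
  | zero => simp [fillA]
  | succ m ih =>
    rw [fillA_succ, writeN, List.getElem?_set]
    by_cases hrm : m = r
    · subst hrm
      rw [if_pos rfl, length_fillA, if_pos (by omega), if_pos (by omega)]
      have h1 := ih (by omega)
      rw [if_neg (by omega)] at h1
      have h2 : (fillA fs opn m).getD m [] = fs.getD m [] := by
        rw [List.getD_eq_getElem?_getD, h1, List.getD_eq_getElem?_getD]
      rw [h2]
    · rw [if_neg hrm, ih (by omega)]
      by_cases hr : r < m
      · rw [if_pos hr, if_pos (by omega)]
      · rw [if_neg hr, if_neg (by omega)]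

-- B's per-block value and rebuilt row
def vB (fs : List (List Int)) (opn b : Nat) : Int :=
  cellN fs (b * opn) 4 + cellN fs (b * opn) 5

def rowB (fs : List (List Int)) (opn b : Nat) (row : List Int) : List Int :=
  row.take 8 ++ [vB fs opn b] ++ row.drop 9

def blocksB (fs : List (List Int)) (opn j : Nat) : List (List Int) :=
  (List.range j).flatMap (fun b => ((fs.drop (b * opn)).take opn).map (rowB fs opn b))

lemma blocksB_succ (fs : List (List Int)) (opn j : Nat) :
    blocksB fs opn (j + 1) =
      blocksB fs opn j ++ ((fs.drop (j * opn)).take opn).map (rowB fs opn j) := by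
  rw [blocksB, List.range_succ, List.flatMap_append, blocksB]
  simp

lemma length_blocksB (fs : List (List Int)) (opn j : Nat) (h : j * opn ≤ fs.length) :
    (blocksB fs opn j).length = j * opn := by
  induction j with
  | zero => simp [blocksB]
  | succ j ih =>
    have hsm : (j + 1) * opn = j * opn + opn := Nat.succ_mul j opn
    rw [blocksB_succ, List.length_append, List.length_map, List.length_take,
      List.length_drop, ih (by omega)]
    omega

lemma getElem?_blocksB (fs : List (List Int)) (opn j : Nat) (hopn : 0 < opn)
    (h : j * opn ≤ fs.length) (r : Nat) (hr : r < j * opn) :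
    (blocksB fs opn j)[r]? = some (rowB fs opn (r / opn) (fs.getD r [])) := by
  induction j with
  | zero => omega
  | succ j ih =>
    have hsm : (j + 1) * opn = j * opn + opn := Nat.succ_mul j opn
    have hj : j * opn ≤ fs.length := by omega
    rw [blocksB_succ]
    by_cases hrj : r < j * opn
    · rw [List.getElem?_append_left (by rw [length_blocksB fs opn j hj]; omega), ih hj hrj]
    · have hlen : (blocksB fs opn j).length = j * opn := length_blocksB fs opn j hj
      rw [List.getElem?_append_right (by omega)]
      set off := r - j * opn with hoff
      have hofflt : off < opn := by omega
      rw [hlen, List.getElem?_map, List.getElem?_take, if_pos hofflt, List.getElem?_drop]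
      have hidx : j * opn + off = r := by omega
      have hrlen : r < fs.length := by omega
      have hdiv : r / opn = j := by
        rw [← hidx, Nat.mul_comm j opn, Nat.mul_add_div hopn, Nat.div_eq_of_lt hofflt,
          Nat.add_zero]
      rw [hidx, hdiv, List.getElem?_eq_getElem hrlen]
      simp [List.getD_eq_getElem?_getD, List.getElem?_eq_getElem hrlen]

-- B's port, in positive-case Nat form
lemma alt_eq_blocksB (fs : List (List Int)) (jn opn : Nat) (hj : 0 < jn) (ho : 0 < opn)
    (hlen : jn * opn ≤ fs.length) :
    job_time_length_alt fs (jn : Int) (opn : Int) = blocksB fs opn jn ++ fs.drop (jn * opn) := by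
  have hguard : ¬ ((jn : Int) ≤ 0 ∨ (opn : Int) ≤ 0) := by
    push_neg; exact ⟨by exact_mod_cast hj, by exact_mod_cast ho⟩
  have hn : (jn : Int) * (opn : Int) = ((jn * opn : Nat) : Int) := by push_cast; ring
  simp only [job_time_length_alt]
  rw [if_neg hguard, hn]
  rw [PySem.List.pyRange_of_pos 0 ((jn * opn : Nat) : Int) (by exact_mod_cast ho)]
  have hpos : (0 : Int) < ((jn * opn : Nat) : Int) := by
    have : 0 < jn * opn := Nat.mul_pos hj ho
    exact_mod_cast this
  rw [if_pos hpos]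
  have hK : ((((jn * opn : Nat) : Int) - 0 + (opn : Int) - 1) / (opn : Int)).toNat = jn := by
    have h1 : ((jn * opn : Nat) : Int) - 0 + (opn : Int) - 1 = ((jn * opn + (opn - 1) : Nat) : Int) := by
      omega
    rw [h1, ← Int.natCast_div, Int.toNat_natCast, Nat.mul_comm jn opn,
      Nat.mul_add_div ho, Nat.div_eq_of_lt (by omega), Nat.add_zero]
  rw [hK, List.foldl_map, PySem.List.foldl_append_eq_flatMap, List.nil_append,
    PySem.List.slice_from_natCast]
  congr 1
  apply List.flatMap_congr
  intro b hb
  have hb' : b < jn := List.mem_range.mp hb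
  have hk : (0 : Int) + (opn : Int) * (b : Int) = ((b * opn : Nat) : Int) := by push_cast; ring
  rw [hk, PySem.List.slice_natCast_add]
  have hblen : (b + 1) * opn ≤ fs.length := by
    calc (b + 1) * opn ≤ jn * opn := Nat.mul_le_mul_right opn (by omega)
    _ ≤ fs.length := hlen
  have hhead : ((fs.drop (b * opn)).take opn).getD 0 [] = fs.getD (b * opn) [] := by
    rw [List.getD_eq_getElem?_getD, List.getElem?_take, if_pos ho, List.getElem?_drop,
      Nat.add_zero, ← List.getD_eq_getElem?_getD]
  rw [PySem.List.pyGetD_zero, hhead]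
  apply List.map_congr_left
  intro row _
  rw [PySem.List.slice_to row (by norm_num), PySem.List.slice_from row (by norm_num)]
  have h8 : ((8 : Int)).toNat = 8 := rfl
  have h9 : ((9 : Int)).toNat = 9 := rfl
  rw [h8, h9, rowB, vB]
  congr 2
  simp [cellN, PySem.List.pyGetD_ofNat']

-- ===== VERDICT (by name: the statement is the Claim_ definition above) =====
theorem job_time_length_spec : Claim_equal_job_time_length := by
  intro features jobs operations _ hpre
  unfold Spec_job_time_length
  rcases hpre with h | ⟨hj, ho, hlen, hrows⟩
  · have hguard : jobs ≤ 0 ∨ operations ≤ 0 := by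
      by_contra hc; push_neg at hc; nlinarith [mul_pos hc.1 hc.2]
    rw [job_time_length, jtlOuter, if_neg (not_lt.mpr h), job_time_length_alt, if_pos hguard]
  · obtain ⟨jn, rfl⟩ : ∃ jn : Nat, jobs = (jn : Int) := ⟨jobs.toNat, by omega⟩
    obtain ⟨opn, rfl⟩ : ∃ opn : Nat, operations = (opn : Int) := ⟨operations.toNat, by omega⟩
    have hj' : 0 < jn := by exact_mod_cast hj
    have ho' : 0 < opn := by exact_mod_cast ho
    have hn : (jn : Int) * (opn : Int) = ((jn * opn : Nat) : Int) := by push_cast; ring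
    have hm : jn * opn ≤ features.length := by
      have : ((jn * opn : Nat) : Int) ≤ (features.length : Int) := by rw [← hn]; exact hlen
      exact_mod_cast this
    have hA := outer_eq jn (jn + 1) features 0 (jn : Int) (opn : Int) ho (by simp) (by omega)
    simp only [Int.toNat_natCast, Nat.zero_mul, Nat.cast_zero, Nat.zero_add] at hA
    have hA' : job_time_length features (jn : Int) (opn : Int) = fillA features opn (jn * opn) := by
      rw [job_time_length]
      simp only [Int.toNat_natCast]
      rw [hA]
      rfl
    rw [hA', alt_eq_blocksB features jn opn hj' ho' hm]
    apply List.ext_getElem?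
    intro r
    by_cases hr : r < jn * opn
    · rw [getElem?_fillA features opn (jn * opn) hm r, if_pos hr,
        List.getElem?_append_left (by rw [length_blocksB features opn jn hm]; omega),
        getElem?_blocksB features opn jn ho' hm r hr]
      congr 1
      have hrlen : r < features.length := by omega
      have hrowmem : features.getD r [] ∈ features.take (jn * opn) := by
        have hrt : r < (features.take (jn * opn)).length := by
          rw [List.length_take]; omega
        have : (features.take (jn * opn))[r] = features.getD r [] := by
          rw [List.getElem_take, List.getD_eq_getElem?_getD, List.getElem?_eq_getElem hrlen]
          rfl
        rw [← this]
        exact List.getElem_mem hrt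
      have h9 : 9 ≤ (features.getD r []).length := by
        apply hrows
        have : (((jn : Int) * (opn : Int))).toNat = jn * opn := by
          rw [hn]; exact Int.toNat_natCast _
        rw [this]; exact hrowmem
      rw [rowB, List.set_eq_take_append_cons_drop, if_pos (by omega),
        List.append_assoc, List.singleton_append]
      rfl
    · rw [getElem?_fillA features opn (jn * opn) hm r, if_neg hr,
        List.getElem?_append_right (by rw [length_blocksB features opn jn hm]; omega),
        length_blocksB features opn jn hm, List.getElem?_drop]
      congr 1
      omega
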